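-- pv_equiv track=rewrite | github.com/adityabhattad2021/DSA | graphs/largest_component.py | recursive_dfs
-- ===== SOURCE A (Python) =====
-- def recursive_dfs(graph,element,visited):
--   if element in visited:
--     return 0
--   visited[element]=True
--   neighbours_list = graph[element]
--   count = 0
--   for node in neighbours_list:
--     count+=recursive_dfs(graph,node,visited)
--   return count+1
-- ===== SOURCE B (Python) =====
-- # Iterative worklist DFS with an explicit stack instead of recursion; same return
-- # value and same in-place mutation of `visited` (same visit order) as A.
-- def recursive_dfs(graph, element, visited):
--     stack = [element]
--     count = 0
--     while stack:
--         node = stack.pop(0)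
--         if node in visited:
--             continue
--         neighbours = graph[node]
--         visited[node] = True
--         count += 1
--         stack = neighbours + stack
--     return count
-- ===== Notes on version B (the rewrite author's own statement) =====
-- stated objective: alternative
-- what changed: Replaced the recursive DFS by an iterative worklist loop with an explicit stack (pop front, push neighbours in front), visiting the same nodes in the same order without recursion.
import Mathlib
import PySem

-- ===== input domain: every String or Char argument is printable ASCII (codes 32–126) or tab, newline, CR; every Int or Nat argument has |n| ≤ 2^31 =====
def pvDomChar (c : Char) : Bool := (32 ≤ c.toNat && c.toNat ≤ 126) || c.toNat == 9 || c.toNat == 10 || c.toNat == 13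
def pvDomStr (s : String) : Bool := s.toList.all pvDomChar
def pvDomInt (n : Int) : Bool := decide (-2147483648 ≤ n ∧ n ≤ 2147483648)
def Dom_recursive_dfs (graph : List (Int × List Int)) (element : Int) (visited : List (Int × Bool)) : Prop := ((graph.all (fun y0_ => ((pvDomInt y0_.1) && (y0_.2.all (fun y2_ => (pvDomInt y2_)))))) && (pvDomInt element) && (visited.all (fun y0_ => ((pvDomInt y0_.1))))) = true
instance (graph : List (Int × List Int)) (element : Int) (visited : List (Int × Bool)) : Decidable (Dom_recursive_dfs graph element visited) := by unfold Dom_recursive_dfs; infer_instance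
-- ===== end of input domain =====

-- B replaces A's recursive DFS by an iterative worklist loop with an explicit stack
-- (same visit order, same count); both Pythons mutate `visited` identically — the
-- equivalence proved here is about the RETURN value.


-- ===== PORT A =====
-- Fuel-based transliteration of A's recursion; `graph.length + 1` fuel always
-- suffices (each fuel-consuming call marks a fresh graph key visited), so the
-- `none` fallback of the outer wrapper is only reached on KeyError inputs,
-- which Pre_ excludes.
mutual
def dfsA (graph : List (Int × List Int)) (f : Nat) (e : Int) (v : PySem.Dict Int Bool) :
    Option (Int × PySem.Dict Int Bool) :=
  if PySem.Dict.contains v e then some (0, v)                -- if element in visited: return 0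
  else
    match PySem.Dict.get? (PySem.Dict.mk graph) e with       -- neighbours_list = graph[element] (none = KeyError)
    | none => none
    | some ns =>
      match f with
      | 0 => none
      | g + 1 =>
        match dfsAList graph g ns (PySem.Dict.insert v e true) 0 with   -- visited[element] = True; loop
        | none => none
        | some (c, v') => some (c + 1, v')                   -- return count + 1
termination_by (f, 0)

def dfsAList (graph : List (Int × List Int)) (f : Nat) (ns : List Int) (v : PySem.Dict Int Bool) (c : Int) :
    Option (Int × PySem.Dict Int Bool) :=
  match ns with
  | [] => some (c, v)
  | n :: rest =>
    match dfsA graph f n v with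
    | none => none
    | some (c', v') => dfsAList graph f rest v' (c + c')     -- count += recursive_dfs(...)
termination_by (f, ns.length + 1)
end

def recursive_dfs (graph : List (Int × List Int)) (element : Int) (visited : List (Int × Bool)) : Int :=
  match dfsA graph (graph.length + 1) element (PySem.Dict.mk visited) with
  | some (c, _) => c
  | none => 0

-- ===== PORT B =====
-- Transliteration of Source B's worklist loop; fuel is consumed only when a node is
-- newly visited, so `graph.length + 1` again always suffices inside Pre_.
def dfsB (graph : List (Int × List Int)) (f : Nat) (s : List Int) (v : PySem.Dict Int Bool) (c : Int) :
    Option Int :=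
  match s with
  | [] => some c                                             -- while stack: … return count
  | n :: rest =>
    if PySem.Dict.contains v n then dfsB graph f rest v c    -- if node in visited: continue
    else
      match PySem.Dict.get? (PySem.Dict.mk graph) n with     -- neighbours = graph[node]
      | none => none
      | some ns =>
        match f with
        | 0 => none
        | g + 1 => dfsB graph g (ns ++ rest) (PySem.Dict.insert v n true) (c + 1)  -- mark, count, push
termination_by (f, s.length)

def recursive_dfs_alt (graph : List (Int × List Int)) (element : Int) (visited : List (Int × Bool)) : Int :=
  match dfsB graph (graph.length + 1) [element] (PySem.Dict.mk visited) 0 with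
  | some c => c
  | none => 0

-- ===== PRECONDITION & SPEC =====
-- `n` is safe to look at: it is already visited or it is a key of graph.
def OkNode (graph : List (Int × List Int)) (v : PySem.Dict Int Bool) (n : Int) : Prop :=
  PySem.Dict.contains v n = true ∨ (PySem.Dict.get? (PySem.Dict.mk graph) n).isSome = true

-- S is closed under one expansion step: the neighbours of every not-yet-visited
-- member of S that is a graph key are again in S.
def ClosedS (graph : List (Int × List Int)) (v0 : PySem.Dict Int Bool) (S : List Int) : Prop :=
  ∀ k ∈ S, PySem.Dict.contains v0 k = false →
    ∀ n ∈ (PySem.Dict.get? (PySem.Dict.mk graph) k).getD [], n ∈ S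

-- one step of the transitive closure: add the neighbour lists of all unvisited
-- graph keys already in S (a plain successor-map closure, not either port's DFS)
def stepSet (graph : List (Int × List Int)) (v0 : PySem.Dict Int Bool) (S : List Int) : List Int :=
  (S ++ (graph.filter (fun p => decide (p.1 ∈ S) && !(PySem.Dict.contains v0 p.1))).flatMap Prod.snd).dedup

-- the set of nodes reachable from element through initially-unvisited graph keys;
-- graph.length + 1 iterations always reach the fixpoint (each productive step
-- enlarges the set of expanded graph entries, of which there are ≤ graph.length)
def reachSet (graph : List (Int × List Int)) (visited : List (Int × Bool)) (element : Int) : List Int :=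
  (stepSet graph (PySem.Dict.mk visited))^[graph.length + 1] [element]

-- Pre_ excludes exactly the inputs on which the Python A raises KeyError: it holds
-- iff every node reachable from element through initially-unvisited nodes is a graph
-- key or already visited (the closure conjunct is always true of reachSet, which is
-- iterated to its fixpoint, so no input on which A returns is excluded).
def Pre_recursive_dfs (graph : List (Int × List Int)) (element : Int) (visited : List (Int × Bool)) : Prop :=
  element ∈ reachSet graph visited element ∧
  ClosedS graph (PySem.Dict.mk visited) (reachSet graph visited element) ∧
  ∀ n ∈ reachSet graph visited element, OkNode graph (PySem.Dict.mk visited) n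

instance (graph : List (Int × List Int)) (element : Int) (visited : List (Int × Bool)) : Decidable (Pre_recursive_dfs graph element visited) := by
  unfold Pre_recursive_dfs ClosedS OkNode; infer_instance

def pvWitness_recursive_dfs : (List (Int × List Int)) × Int × (List (Int × Bool)) :=
  ([(0, [1, 2]), (1, [0]), (2, [])], 0, [])

def Spec_recursive_dfs (graph : List (Int × List Int)) (element : Int) (visited : List (Int × Bool)) (out : Int) : Prop := out = recursive_dfs_alt graph element visited
instance (graph : List (Int × List Int)) (element : Int) (visited : List (Int × Bool)) (out : Int) : Decidable (Spec_recursive_dfs graph element visited out) := by unfold Spec_recursive_dfs; infer_instance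

-- ===== CLAIM (what is proved, stated in full; the proofs are below) =====
def Claim_equal_recursive_dfs : Prop := ∀ (graph : List (Int × List Int)) (element : Int) (visited : List (Int × Bool)), Dom_recursive_dfs graph element visited → Pre_recursive_dfs graph element visited → Spec_recursive_dfs graph element visited (recursive_dfs graph element visited)

-- ===== LEMMAS AND PROOFS =====

-- number of graph keys not yet visited: the termination/fuel measure
def unvis (graph : List (Int × List Int)) (v : PySem.Dict Int Bool) : Nat :=
  (graph.map Prod.fst).countP (fun k => ! PySem.Dict.contains v k)

theorem countP_lt_of_strict {α : Type} (p q : α → Bool) (l : List α) (e : α)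
    (hmono : ∀ a ∈ l, p a = true → q a = true) (he : e ∈ l)
    (hq : q e = true) (hp : p e = false) : l.countP p < l.countP q := by
  induction l with
  | nil => cases he
  | cons a l ih =>
    rcases List.mem_cons.mp he with rfl | hmem
    · simp only [List.countP_cons, hp, hq]
      have := List.countP_mono_left (p := p) (q := q) (l := l)
        (fun a ha hp => hmono a (List.mem_cons_of_mem _ ha) hp)
      norm_num
      omega
    · have := ih (fun a ha hp => hmono a (List.mem_cons_of_mem _ ha) hp) hmem
      have hhead : p a = true → q a = true := hmono a List.mem_cons_self
      simp only [List.countP_cons]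
      cases hpa : p a <;> cases hqa : q a <;> simp_all
      all_goals omega

theorem contains_mono_insert (v : PySem.Dict Int Bool) (e k : Int) (b : Bool)
    (h : PySem.Dict.contains v k = true) : PySem.Dict.contains (PySem.Dict.insert v e b) k = true := by
  rw [PySem.Dict.contains_insert]
  simp [h]

theorem mem_keys_of_get?_some (graph : List (Int × List Int)) (e : Int) (ns : List Int)
    (h : PySem.Dict.get? (PySem.Dict.mk graph) e = some ns) : e ∈ graph.map Prod.fst := by
  have := PySem.Dict.mem_items_of_get?_eq_some _ h
  exact List.mem_map.mpr ⟨(e, ns), this, rfl⟩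

theorem unvis_insert_lt (graph : List (Int × List Int)) (v : PySem.Dict Int Bool) (e : Int)
    (hk : e ∈ graph.map Prod.fst) (hnc : PySem.Dict.contains v e = false) :
    unvis graph (PySem.Dict.insert v e true) < unvis graph v := by
  unfold unvis
  apply countP_lt_of_strict _ _ _ e
  · intro a _ hp
    cases hc : PySem.Dict.contains v a
    · rfl
    · exfalso
      have := contains_mono_insert v e a true hc
      simp [this] at hp
  · exact hk
  · simp [hnc]
  · simp

theorem unvis_mono (graph : List (Int × List Int)) (v v' : PySem.Dict Int Bool)
    (h : ∀ k, PySem.Dict.contains v k = true → PySem.Dict.contains v' k = true) :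
    unvis graph v' ≤ unvis graph v := by
  unfold unvis
  apply List.countP_mono_left
  intro a _ hp
  cases hc : PySem.Dict.contains v a
  · rfl
  · exact absurd (h a hc) (by simp_all)

theorem closed_neighbours (graph : List (Int × List Int)) (v0 : PySem.Dict Int Bool) (S : List Int)
    (e : Int) (ns : List Int) (hclosed : ClosedS graph v0 S) (he : e ∈ S)
    (hv0 : PySem.Dict.contains v0 e = false)
    (hns : PySem.Dict.get? (PySem.Dict.mk graph) e = some ns) : ∀ n ∈ ns, n ∈ S := by
  have := hclosed e he hv0
  rw [hns] at this
  simpa using this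

-- visited only grows along A's recursion
mutual
theorem dfsA_grows (graph : List (Int × List Int)) (f : Nat) (e : Int) (v : PySem.Dict Int Bool)
    (c : Int) (v' : PySem.Dict Int Bool) (h : dfsA graph f e v = some (c, v')) :
    ∀ k, PySem.Dict.contains v k = true → PySem.Dict.contains v' k = true := by
  unfold dfsA at h
  split at h
  · cases h
    exact fun k hk => hk
  · split at h
    · exact absurd h (by simp)
    · next ns hns =>
      split at h
      · exact absurd h (by simp)
      · next g =>
        split at h
        · exact absurd h (by simp)
        · next c0 v0 hcall =>
          cases h
          intro k hk
          exact dfsAList_grows graph g ns (PySem.Dict.insert v e true) 0 c0 _ hcall k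
            (contains_mono_insert v e k true hk)
termination_by (f, 0)

theorem dfsAList_grows (graph : List (Int × List Int)) (f : Nat) (ns : List Int) (v : PySem.Dict Int Bool)
    (c c' : Int) (v' : PySem.Dict Int Bool) (h : dfsAList graph f ns v c = some (c', v')) :
    ∀ k, PySem.Dict.contains v k = true → PySem.Dict.contains v' k = true := by
  unfold dfsAList at h
  split at h
  · cases h
    exact fun k hk => hk
  · next n rest =>
    split at h
    · exact absurd h (by simp)
    · next c1 v1 hcall =>
      intro k hk
      exact dfsAList_grows graph f rest v1 (c + c1) c' v' h k
        (dfsA_grows graph f n v c1 v1 hcall k hk)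
termination_by (f, ns.length + 1)
end

-- with enough fuel, A's port never returns none when every node of the closed,
-- all-ok set S that it can reach stays inside S
mutual
theorem dfsA_total (graph : List (Int × List Int)) (f : Nat) (e : Int)
    (v v0 : PySem.Dict Int Bool) (S : List Int)
    (hmono : ∀ k, PySem.Dict.contains v0 k = true → PySem.Dict.contains v k = true)
    (hclosed : ClosedS graph v0 S) (hok : ∀ n ∈ S, OkNode graph v0 n)
    (he : e ∈ S) (hf : unvis graph v ≤ f) :
    (dfsA graph f e v).isSome = true := by
  unfold dfsA
  split
  · rfl
  · next hnc =>
    have hv0e : PySem.Dict.contains v0 e = false := by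
      cases hcv : PySem.Dict.contains v0 e
      · rfl
      · exact absurd (hmono e hcv) hnc
    rcases hok e he with hc | hsome
    · exact absurd hc (by simp [hv0e] at hc)
    · obtain ⟨ns, hns⟩ := Option.isSome_iff_exists.mp hsome
      simp only [hns]
      have hkey := mem_keys_of_get?_some graph e ns hns
      have hncf : PySem.Dict.contains v e = false := by
        cases hcv : PySem.Dict.contains v e
        · rfl
        · exact absurd hcv hnc
      have hpos : 0 < unvis graph v := by
        exact List.countP_pos_iff.mpr ⟨e, hkey, by simp [hncf]⟩
      cases f with
      | zero => omega
      | succ g =>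
        have hmono' : ∀ k, PySem.Dict.contains v0 k = true →
            PySem.Dict.contains (PySem.Dict.insert v e true) k = true :=
          fun k hk => contains_mono_insert v e k true (hmono k hk)
        have hlt := unvis_insert_lt graph v e hkey hncf
        have h1 := dfsAList_total graph g ns (PySem.Dict.insert v e true) 0 v0 S
          hmono' hclosed hok
          (closed_neighbours graph v0 S e ns hclosed he hv0e hns)
          (by omega)
        obtain ⟨⟨c1, v1⟩, hp⟩ := Option.isSome_iff_exists.mp h1
        simp [hp]
termination_by (f, 0)

theorem dfsAList_total (graph : List (Int × List Int)) (f : Nat) (ns : List Int)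
    (v : PySem.Dict Int Bool) (c : Int) (v0 : PySem.Dict Int Bool) (S : List Int)
    (hmono : ∀ k, PySem.Dict.contains v0 k = true → PySem.Dict.contains v k = true)
    (hclosed : ClosedS graph v0 S) (hok : ∀ n ∈ S, OkNode graph v0 n)
    (hns : ∀ n ∈ ns, n ∈ S) (hf : unvis graph v ≤ f) :
    (dfsAList graph f ns v c).isSome = true := by
  unfold dfsAList
  split
  · rfl
  · next n rest =>
    have h1 := dfsA_total graph f n v v0 S hmono hclosed hok (hns n List.mem_cons_self) hf
    obtain ⟨⟨c1, v1⟩, hp⟩ := Option.isSome_iff_exists.mp h1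
    rw [hp]
    have hgrow := dfsA_grows graph f n v c1 v1 hp
    exact dfsAList_total graph f rest v1 (c + c1) v0 S
      (fun k hk => hgrow k (hmono k hk)) hclosed hok
      (fun m hm => hns m (List.mem_cons_of_mem _ hm))
      (le_trans (unvis_mono graph v v1 hgrow) hf)
termination_by (f, ns.length + 1)
end

-- with enough fuel, B's port never returns none under the same hypotheses
theorem dfsB_total (graph : List (Int × List Int)) (f : Nat) (s : List Int)
    (v : PySem.Dict Int Bool) (c : Int) (v0 : PySem.Dict Int Bool) (S : List Int)
    (hmono : ∀ k, PySem.Dict.contains v0 k = true → PySem.Dict.contains v k = true)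
    (hclosed : ClosedS graph v0 S) (hok : ∀ n ∈ S, OkNode graph v0 n)
    (hs : ∀ n ∈ s, n ∈ S) (hf : unvis graph v ≤ f) :
    (dfsB graph f s v c).isSome = true := by
  unfold dfsB
  split
  · rfl
  · next n rest =>
    split
    · exact dfsB_total graph f rest v c v0 S hmono hclosed hok
        (fun m hm => hs m (List.mem_cons_of_mem _ hm)) hf
    · next hnc =>
      have hv0n : PySem.Dict.contains v0 n = false := by
        cases hcv : PySem.Dict.contains v0 n
        · rfl
        · exact absurd (hmono n hcv) hnc
      rcases hok n (hs n List.mem_cons_self) with hc | hsome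
      · exact absurd hc (by simp [hv0n] at hc)
      · obtain ⟨ns, hns2⟩ := Option.isSome_iff_exists.mp hsome
        simp only [hns2]
        have hkey := mem_keys_of_get?_some graph n ns hns2
        have hncf : PySem.Dict.contains v n = false := by
          cases hcv : PySem.Dict.contains v n
          · rfl
          · exact absurd hcv hnc
        have hpos : 0 < unvis graph v := by
          exact List.countP_pos_iff.mpr ⟨n, hkey, by simp [hncf]⟩
        cases f with
        | zero => omega
        | succ g =>
          have hmono' : ∀ k, PySem.Dict.contains v0 k = true →
              PySem.Dict.contains (PySem.Dict.insert v n true) k = true :=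
            fun k hk => contains_mono_insert v n k true (hmono k hk)
          have hlt := unvis_insert_lt graph v n hkey hncf
          exact dfsB_total graph g (ns ++ rest) (PySem.Dict.insert v n true) (c + 1) v0 S
            hmono' hclosed hok
            (fun m hm => by
              rcases List.mem_append.mp hm with hm1 | hm2
              · exact closed_neighbours graph v0 S n ns hclosed (hs n List.mem_cons_self) hv0n hns2 m hm1
              · exact hs m (List.mem_cons_of_mem _ hm2))
            (by omega)
termination_by (f, s.length)

-- B's fuel is monotone: a successful run stays successful with more fuel
theorem dfsB_mono (graph : List (Int × List Int)) (f : Nat) (s : List Int) (v : PySem.Dict Int Bool)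
    (c r : Int) (h : dfsB graph f s v c = some r) : dfsB graph (f + 1) s v c = some r := by
  cases s with
  | nil =>
    unfold dfsB at h ⊢
    exact h
  | cons n rest =>
    unfold dfsB at h ⊢
    split at h
    · next hc =>
      rw [if_pos hc]
      exact dfsB_mono graph f rest v c r h
    · next hc =>
      rw [if_neg hc]
      split at h
      · exact absurd h (by simp)
      · next ns hg2 =>
        split at h
        · exact absurd h (by simp)
        · next g => exact dfsB_mono graph g (ns ++ rest) (PySem.Dict.insert v n true) (c + 1) r h
termination_by (f, s.length)

theorem dfsB_mono_le (graph : List (Int × List Int)) (f g : Nat) (s : List Int) (v : PySem.Dict Int Bool)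
    (c r : Int) (hfg : f ≤ g) (h : dfsB graph f s v c = some r) : dfsB graph g s v c = some r := by
  induction g, hfg using Nat.le_induction with
  | base => exact h
  | succ g hg ih => exact dfsB_mono graph g s v c r ih

theorem dfsB_det (graph : List (Int × List Int)) (f g : Nat) (s : List Int) (v : PySem.Dict Int Bool)
    (c a b : Int) (ha : dfsB graph f s v c = some a) (hb : dfsB graph g s v c = some b) : a = b := by
  rcases Nat.le_total f g with hle | hle
  · have := dfsB_mono_le graph f g s v c a hle ha
    rw [this] at hb
    exact Option.some_inj.mp hb
  · have := dfsB_mono_le graph g f s v c b hle hb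
    rw [this] at ha
    exact (Option.some_inj.mp ha).symm

-- SIMULATION: running A on e and then B on the rest of the stack is B on e::K
mutual
theorem simA (graph : List (Int × List Int)) (fA : Nat) (e : Int) (v : PySem.Dict Int Bool)
    (d : Int) (v' : PySem.Dict Int Bool) (hA : dfsA graph fA e v = some (d, v'))
    (K : List Int) (c r : Int) (fB : Nat) (hB : dfsB graph fB K v' (c + d) = some r) :
    ∃ fB', dfsB graph fB' (e :: K) v c = some r := by
  unfold dfsA at hA
  split at hA
  · next hc =>
    cases hA
    refine ⟨fB, ?_⟩
    unfold dfsB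
    simp only [hc, if_true]
    simpa using hB
  · next hnc =>
    split at hA
    · exact absurd hA (by simp)
    · next ns hns =>
      split at hA
      · exact absurd hA (by simp)
      · next g =>
        split at hA
        · exact absurd hA (by simp)
        · next c0 v0 hcall =>
          cases hA
          have hB' : dfsB graph fB K v' ((c + 1) + (c0 - 0)) = some r := by
            have harith : (c + 1) + (c0 - 0) = c + (c0 + 1) := by ring
            rw [harith]
            exact hB
          obtain ⟨fB2, h2⟩ := simAList graph g ns (PySem.Dict.insert v e true) 0 c0 v' hcall K
            (c + 1) r fB hB'
          refine ⟨fB2 + 1, ?_⟩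
          unfold dfsB
          have hncf : PySem.Dict.contains v e = false := by
            cases hcv : PySem.Dict.contains v e
            · rfl
            · exact absurd hcv hnc
          simp only [hncf, hns]
          exact h2
termination_by (fA, 0)

theorem simAList (graph : List (Int × List Int)) (fA : Nat) (ns : List Int) (v : PySem.Dict Int Bool)
    (a d : Int) (v' : PySem.Dict Int Bool) (hA : dfsAList graph fA ns v a = some (d, v'))
    (K : List Int) (c r : Int) (fB : Nat) (hB : dfsB graph fB K v' (c + (d - a)) = some r) :
    ∃ fB', dfsB graph fB' (ns ++ K) v c = some r := by
  unfold dfsAList at hA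
  split at hA
  · cases hA
    refine ⟨fB, ?_⟩
    simpa using hB
  · next n rest =>
    split at hA
    · exact absurd hA (by simp)
    · next c1 v1 hcall =>
      have hB' : dfsB graph fB K v' ((c + c1) + (d - (a + c1))) = some r := by
        have harith : (c + c1) + (d - (a + c1)) = c + (d - a) := by ring
        rw [harith]
        exact hB
      obtain ⟨fB2, h2⟩ := simAList graph fA rest v1 (a + c1) d v' hA K (c + c1) r fB hB'
      obtain ⟨fB3, h3⟩ := simA graph fA n v c1 v1 hcall (rest ++ K) c r fB2 h2
      exact ⟨fB3, h3⟩
termination_by (fA, ns.length + 1)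
end

-- ===== VERDICT (by name: the statement is the Claim_ definition above) =====
theorem recursive_dfs_spec : Claim_equal_recursive_dfs := by
  intro graph element visited _ hpre
  obtain ⟨hel, hclosed, hok⟩ := hpre
  unfold Spec_recursive_dfs recursive_dfs recursive_dfs_alt
  have hfuel : unvis graph (PySem.Dict.mk visited) ≤ graph.length + 1 := by
    have h1 : unvis graph (PySem.Dict.mk visited) ≤ (graph.map Prod.fst).length :=
      List.countP_le_length
    have h2 : (graph.map Prod.fst).length = graph.length := List.length_map _
    omega
  have hA := dfsA_total graph (graph.length + 1) element (PySem.Dict.mk visited)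
    (PySem.Dict.mk visited) (reachSet graph visited element) (fun k hk => hk) hclosed hok hel hfuel
  obtain ⟨⟨d, v'⟩, hAeq⟩ := Option.isSome_iff_exists.mp hA
  have hBstart : dfsB graph 0 [] v' (0 + d) = some d := by
    unfold dfsB
    norm_num
  obtain ⟨fB', hsim⟩ := simA graph (graph.length + 1) element (PySem.Dict.mk visited) d v'
    hAeq [] 0 d 0 hBstart
  have hBtot := dfsB_total graph (graph.length + 1) [element] (PySem.Dict.mk visited) 0
    (PySem.Dict.mk visited) (reachSet graph visited element) (fun k hk => hk) hclosed hok
    (by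
      intro n hn
      rw [List.mem_singleton] at hn
      subst hn
      exact hel) hfuel
  obtain ⟨rb, hBeq⟩ := Option.isSome_iff_exists.mp hBtot
  have hrb : rb = d := dfsB_det graph (graph.length + 1) fB' [element] (PySem.Dict.mk visited)
    0 rb d hBeq hsim
  rw [hAeq, hBeq, hrb]
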